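-- pv_equiv track=rewrite | github.com/shwjdgh34/algorithms-python | codingTest/codenameB/퐁당퐁당돌을던지자.py | solution
-- ===== SOURCE A (Python) =====
-- import queue
-- import copy
--
-- def solution(grid, d):
--     n = len(grid)
--
--     dx = [0, 0, 1, -1]
--     dy = [1, -1, 0, 0]
--
--     def bfs(i, j, d, tmpGrid):
--         count = 0
--         q = queue.Queue()
--         q.put((i, j, 0))
--         count += 1
--         tmpGrid[i][j] = 1
--         while q.qsize():
--             x, y, curD = q.get()
--             if curD >= d:
--                 continue
--             for k in range(4):
--                 nextX = x+dx[k]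
--                 nextY = y+dy[k]
--                 if 0 <= nextX < n and 0 <= nextY < n:
--                     if tmpGrid[nextX][nextY] == 0:
--                         tmpGrid[nextX][nextY] = 1
--                         q.put((nextX, nextY, curD+1))
--                         count += 1
--
--         return count
--
--     maxI, maxJ = -1, -1
--     maxWater = 0
--     for i in range(n):
--         for j in range(n):
--             if grid[i][j] == 0:
--                 tmpGrid = copy.deepcopy(grid)
--                 output = bfs(i, j, d, tmpGrid)
--                 if maxWater < output:
--                     maxWater = output
--                     maxI, maxJ = i, j
--     return maxWater
-- ===== SOURCE B (Python) =====
-- def solution(grid, d):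
--     # Bellman-Ford-style dense relaxation: per empty source, a whole-grid boolean
--     # reachability matrix is relaxed round by round (no queue, no frontier), with a
--     # fixpoint break; each round extends reach by exactly one step.
--     n = len(grid)
--     best = 0
--     for i in range(n):
--         for j in range(n):
--             if grid[i][j] == 0:
--                 reach = [[x == i and y == j for y in range(n)] for x in range(n)]
--                 count = 1
--                 steps = d
--                 while steps > 0:
--                     new = [[reach[x][y] or (grid[x][y] == 0 and
--                             ((x > 0 and reach[x - 1][y]) or
--                              (x + 1 < n and reach[x + 1][y]) or
--                              (y > 0 and reach[x][y - 1]) or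
--                              (y + 1 < n and reach[x][y + 1])))
--                             for y in range(n)] for x in range(n)]
--                     added = sum(new[x][y] and not reach[x][y]
--                                 for x in range(n) for y in range(n))
--                     if added == 0:
--                         break
--                     count += added
--                     reach = new
--                     steps -= 1
--                 if count > best:
--                     best = count
--     return best
-- ===== Notes on version B (the rewrite author's own statement) =====
-- stated objective: alternative
-- what changed: Replaced the per-source deepcopy + FIFO-queue BFS with depth tags by a Bellman-Ford-style dense relaxation: per empty source a whole-grid boolean reachability matrix is rebuilt round by round (each round ORs in empty in-bounds cells adjacent to a reached cell), counting newly reached cells and breaking at the fixpoint; no queue, no frontier, no grid copy is mutated.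
import Mathlib
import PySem

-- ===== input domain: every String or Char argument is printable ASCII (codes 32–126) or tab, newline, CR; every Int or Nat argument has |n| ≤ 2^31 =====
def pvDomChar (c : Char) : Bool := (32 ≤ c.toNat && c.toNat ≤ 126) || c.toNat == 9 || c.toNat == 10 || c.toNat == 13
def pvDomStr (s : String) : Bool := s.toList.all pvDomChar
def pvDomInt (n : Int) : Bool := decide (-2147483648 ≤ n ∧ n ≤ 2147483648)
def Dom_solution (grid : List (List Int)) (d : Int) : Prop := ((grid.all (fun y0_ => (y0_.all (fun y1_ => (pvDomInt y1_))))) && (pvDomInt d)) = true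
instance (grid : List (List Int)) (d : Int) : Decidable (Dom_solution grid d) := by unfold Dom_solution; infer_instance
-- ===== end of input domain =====

-- B replaces A's per-source deepcopy + FIFO queue BFS by a per-source Bellman-Ford-style dense
-- relaxation of a whole-grid boolean reachability matrix (round-by-round, with a fixpoint break);
-- return values are proved equal on Pre_ (no exceptions).

-- ===== PORT A =====
-- grid[x][y]: every use in A is guarded by 0 <= x,y < n with n <= row lengths under Pre_,
-- so the total getD form below is exact there.
def cellGet (g : List (List Int)) (x y : Int) : Int := (g.getD x.toNat []).getD y.toNat 0

-- tmpGrid[x][y] = 1 (guarded in-bounds, nonnegative indices): exact under the same guards.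
def cellSet (g : List (List Int)) (x y : Int) : List (List Int) :=
  g.set x.toNat ((g.getD x.toNat []).set y.toNat 1)

def dxA : List Int := [0, 0, 1, -1]
def dyA : List Int := [1, -1, 0, 0]

-- body of A's 'for k in range(4)': state is (tmpGrid, remaining queue ++ puts, count)
def neighA (n x y curD : Int) (st : List (List Int) × List (Int × Int × Int) × Int) (k : Nat) :
    List (List Int) × List (Int × Int × Int) × Int :=
  let nextX := x + dxA.getD k 0
  let nextY := y + dyA.getD k 0
  if 0 ≤ nextX ∧ nextX < n ∧ 0 ≤ nextY ∧ nextY < n then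
    if cellGet st.1 nextX nextY == 0 then
      (cellSet st.1 nextX nextY, st.2.1 ++ [(nextX, nextY, curD + 1)], st.2.2 + 1)
    else st
  else st

-- A's 'while q.qsize()' loop; the fuel only makes it total (it is provably sufficient under Pre_:
-- every iteration pops one queue entry and every put turns a zero cell into 1).
def bfsLoopA (n d : Int) : Nat → List (Int × Int × Int) → List (List Int) → Int → Int
  | 0, _, _, count => count
  | _ + 1, [], _, count => count
  | fuel + 1, (x, y, curD) :: qs, tmp, count =>
    if d ≤ curD then bfsLoopA n d fuel qs tmp count
    else
      let st := (List.range 4).foldl (neighA n x y curD) (tmp, qs, count)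
      bfsLoopA n d fuel st.2.1 st.1 st.2.2

def bfsA (n d : Int) (grid : List (List Int)) (i j : Int) : Int :=
  bfsLoopA n d (4 * (grid.map List.length).sum + 1) [(i, j, 0)] (cellSet grid i j) 1

def solution (grid : List (List Int)) (d : Int) : Int :=
  let n : Int := grid.length
  ((PySem.List.pyRange 0 n 1).foldl (fun (st : Int × Int × Int) i =>
    (PySem.List.pyRange 0 n 1).foldl (fun (st : Int × Int × Int) j =>
      if cellGet grid i j == 0 then
        let output := bfsA n d grid i j
        if st.1 < output then (output, i, j) else st
      else st) st) (0, -1, -1)).1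

-- ===== PORT B =====
-- grid[x][y] / reach[x][y]: every use in B has 0 <= x,y < n with n <= row lengths under Pre_
-- (comprehension indices and guarded neighbours), so these total getD forms are exact there.
def cellGetB (g : List (List Int)) (x y : Int) : Int := (g.getD x.toNat []).getD y.toNat 0

def rget (m : List (List Bool)) (x y : Int) : Bool := (m.getD x.toNat []).getD y.toNat false

-- [[x == i and y == j for y in range(n)] for x in range(n)]
def initMat (n i j : Int) : List (List Bool) :=
  (PySem.List.pyRange 0 n 1).map (fun x => (PySem.List.pyRange 0 n 1).map (fun y => x == i && y == j))

-- the comprehension building 'new' from 'reach'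
def relaxMat (grid : List (List Int)) (n : Int) (reach : List (List Bool)) : List (List Bool) :=
  (PySem.List.pyRange 0 n 1).map (fun x => (PySem.List.pyRange 0 n 1).map (fun y =>
    rget reach x y || ((cellGetB grid x y == 0) &&
      ((decide (0 < x) && rget reach (x - 1) y) ||
       (decide (x + 1 < n) && rget reach (x + 1) y) ||
       (decide (0 < y) && rget reach x (y - 1)) ||
       (decide (y + 1 < n) && rget reach x (y + 1))))))

-- added = sum(new[x][y] and not reach[x][y] for x in range(n) for y in range(n))
def addedCnt (n : Int) (nw reach : List (List Bool)) : Int :=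
  (PySem.List.pyRange 0 n 1).foldl (fun acc x =>
    (PySem.List.pyRange 0 n 1).foldl (fun acc y =>
      acc + (if rget nw x y && !rget reach x y then 1 else 0)) acc) 0

-- Source B's 'while steps > 0' loop (steps counts down from d; d <= 0 gives zero rounds)
def relaxLoop (grid : List (List Int)) (n : Int) : Nat → List (List Bool) → Int → Int
  | 0, _, count => count
  | s + 1, reach, count =>
    let nw := relaxMat grid n reach
    let added := addedCnt n nw reach
    if added = 0 then count else relaxLoop grid n s nw (count + added)

def solution_alt (grid : List (List Int)) (d : Int) : Int :=
  let n : Int := grid.length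
  (PySem.List.pyRange 0 n 1).foldl (fun (best : Int) i =>
    (PySem.List.pyRange 0 n 1).foldl (fun (best : Int) j =>
      if cellGetB grid i j == 0 then
        let count := relaxLoop grid n d.toNat (initMat n i j) 1
        if best < count then count else best
      else best) best) 0

-- ===== PRECONDITION & SPEC =====
-- A (and B) raise IndexError iff some row is shorter than len(grid); Pre_ excludes exactly those.
def Pre_solution (grid : List (List Int)) (d : Int) : Prop :=
  ∀ row ∈ grid, grid.length ≤ row.length
instance (grid : List (List Int)) (d : Int) : Decidable (Pre_solution grid d) := by
  unfold Pre_solution; infer_instance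

def pvWitness_solution : List (List Int) × Int := ([[0, 1], [0, 0]], 1)

def Spec_solution (grid : List (List Int)) (d : Int) (out : Int) : Prop := out = solution_alt grid d
instance (grid : List (List Int)) (d : Int) (out : Int) : Decidable (Spec_solution grid d out) := by unfold Spec_solution; infer_instance

-- ===== CLAIM (what is proved, stated in full; the proofs are below) =====
def Claim_equal_solution : Prop := ∀ (grid : List (List Int)) (d : Int), Dom_solution grid d → Pre_solution grid d → Spec_solution grid d (solution grid d)

-- ===== LEMMAS AND PROOFS =====

-- proof-side intermediate machine: the level-synchronous frontier flood fill.
-- Step 1 (reusing the A-side analysis) proves A's BFS equal to it; Step 2 relates it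
-- to B's matrix relaxation.
def candsB (x y : Int) : List (Int × Int) := [(x, y + 1), (x, y - 1), (x + 1, y), (x - 1, y)]

def candStepB (grid : List (List Int)) (n : Int)
    (st : PySem.Set (Int × Int) × List (Int × Int)) (c : Int × Int) :
    PySem.Set (Int × Int) × List (Int × Int) :=
  if (0 ≤ c.1 ∧ c.1 < n ∧ 0 ≤ c.2 ∧ c.2 < n) ∧ cellGetB grid c.1 c.2 == 0 ∧
      PySem.Set.contains st.1 c = false then
    (PySem.Set.add st.1 c, st.2 ++ [c])
  else st

def stepCellB (grid : List (List Int)) (n : Int)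
    (st : PySem.Set (Int × Int) × List (Int × Int)) (p : Int × Int) :
    PySem.Set (Int × Int) × List (Int × Int) :=
  (candsB p.1 p.2).foldl (candStepB grid n) st

def bLoopB (grid : List (List Int)) (n d : Int) :
    Nat → PySem.Set (Int × Int) → List (Int × Int) → Int → Int
  | 0, _, _, count => count
  | s + 1, vis, frontier, count =>
    if frontier = [] then count
    else
      let st := frontier.foldl (stepCellB grid n) (vis, [])
      bLoopB grid n d s st.1 st.2 (count + st.2.length)

theorem cellGetB_eq_cellGet : cellGetB = cellGet := rfl

theorem bfsLoopA_nil (n d : Int) (fuel : Nat) (tmp : List (List Int)) (count : Int) :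
    bfsLoopA n d fuel [] tmp count = count := by
  cases fuel <;> rfl

-- zero-cell counting (the fuel measure)
def zrow (r : List Int) : Nat := r.countP (fun v => v == 0)
def zcount (g : List (List Int)) : Nat := (g.map zrow).sum

theorem zrow_set_le (r : List Int) (j : Nat) : zrow (r.set j (1 : Int)) ≤ zrow r := by
  induction r generalizing j with
  | nil => simp [zrow]
  | cons a r ih =>
    cases j with
    | zero =>
      simp only [List.set_cons_zero, zrow, List.countP_cons]
      have h1 : ((1 : Int) == 0) = false := by decide
      simp only [h1]
      split_ifs <;> simp_all
    | succ j =>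
      simp only [List.set_cons_succ, zrow, List.countP_cons]
      have := ih j
      simp only [zrow] at this
      omega

theorem zrow_set (r : List Int) (j : Nat) (hj : j < r.length) (h0 : r.getD j 0 = 0) :
    zrow (r.set j (1 : Int)) + 1 = zrow r := by
  induction r generalizing j with
  | nil => simp at hj
  | cons a r ih =>
    cases j with
    | zero =>
      simp only [List.getD_cons_zero] at h0
      simp only [List.set_cons_zero, zrow, List.countP_cons, h0]
      simp
    | succ j =>
      simp only [List.set_cons_succ, zrow, List.countP_cons]
      simp only [List.length_cons] at hj
      have := ih j (by omega) (by simpa using h0)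
      simp only [zrow] at this
      omega

theorem zcount_set (g : List (List Int)) (i : Nat) (r' : List Int) (hi : i < g.length) :
    zcount (g.set i r') + zrow (g.getD i []) = zcount g + zrow r' := by
  induction g generalizing i with
  | nil => simp at hi
  | cons a g ih =>
    cases i with
    | zero => simp only [List.set_cons_zero, zcount, List.map_cons, List.sum_cons, List.getD_cons_zero]; omega
    | succ i =>
      simp only [List.set_cons_succ, zcount, List.map_cons, List.sum_cons, List.getD_cons_succ]
      simp only [List.length_cons] at hi
      have := ih i (by omega)
      simp only [zcount] at this
      omega

theorem zcount_cellSet_le (t : List (List Int)) (x y : Int) :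
    zcount (cellSet t x y) ≤ zcount t := by
  by_cases h : x.toNat < t.length
  · have := zcount_set t x.toNat ((t.getD x.toNat []).set y.toNat 1) h
    have := zrow_set_le (t.getD x.toNat []) y.toNat
    unfold cellSet; omega
  · unfold cellSet
    rw [List.set_eq_of_length_le (by omega)]

theorem zcount_cellSet (t : List (List Int)) (x y : Int)
    (hx : x.toNat < t.length) (hy : y.toNat < (t.getD x.toNat []).length)
    (h0 : cellGet t x y = 0) :
    zcount (cellSet t x y) + 1 = zcount t := by
  have h1 := zcount_set t x.toNat ((t.getD x.toNat []).set y.toNat 1) hx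
  have h2 := zrow_set (t.getD x.toNat []) y.toNat hy (by simpa [cellGet] using h0)
  unfold cellSet; omega

theorem zcount_le_sumlen (g : List (List Int)) : zcount g ≤ (g.map List.length).sum := by
  induction g with
  | nil => simp [zcount]
  | cons a g ih =>
    simp only [zcount, List.map_cons, List.sum_cons] at *
    have := List.countP_le_length (l := a) (p := fun v => v == (0 : Int))
    simp only [zrow]; omega

-- getD/set lemmas
theorem getD_set_self {α : Type} (l : List α) (i : Nat) (a d : α) (h : i < l.length) :
    (l.set i a).getD i d = a := by
  simp [List.getD, h]

theorem getD_set_ne {α : Type} (l : List α) (i k : Nat) (a d : α) (h : k ≠ i) :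
    (l.set i a).getD k d = l.getD k d := by
  simp [List.getD, List.getElem?_set_ne (by omega : i ≠ k)]

theorem cellGet_cellSet_self (t : List (List Int)) (x y : Int)
    (hx : x.toNat < t.length) (hy : y.toNat < (t.getD x.toNat []).length) :
    cellGet (cellSet t x y) x y = 1 := by
  unfold cellGet cellSet
  rw [getD_set_self _ _ _ _ hx, getD_set_self _ _ _ _ hy]

theorem cellGet_cellSet_ne (t : List (List Int)) (x y a b : Int)
    (hx : 0 ≤ x) (hy : 0 ≤ y) (ha : 0 ≤ a) (hb : 0 ≤ b)
    (hne : ¬(a = x ∧ b = y)) :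
    cellGet (cellSet t x y) a b = cellGet t a b := by
  unfold cellGet cellSet
  by_cases hax : a.toNat = x.toNat
  · have hab : b.toNat ≠ y.toNat := by
      intro hby
      exact hne ⟨by omega, by omega⟩
    by_cases hxl : x.toNat < t.length
    · rw [hax, getD_set_self _ _ _ _ hxl, getD_set_ne _ _ _ _ _ hab]
    · rw [List.set_eq_of_length_le (by omega)]
  · rw [getD_set_ne _ _ _ _ _ hax]

-- shape invariant: tmp has the same row structure as grid
def GoodShape (grid tmp : List (List Int)) : Prop :=
  tmp.length = grid.length ∧ ∀ k : Nat, (tmp.getD k []).length = (grid.getD k []).length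

theorem goodShape_refl (g : List (List Int)) : GoodShape g g := ⟨rfl, fun _ => rfl⟩

theorem goodShape_cellSet (grid tmp : List (List Int)) (x y : Int)
    (h : GoodShape grid tmp) : GoodShape grid (cellSet tmp x y) := by
  obtain ⟨h1, h2⟩ := h
  refine ⟨by simpa [cellSet] using h1, fun k => ?_⟩
  by_cases hk : k = x.toNat
  · by_cases hxl : x.toNat < tmp.length
    · subst hk
      rw [cellSet, getD_set_self _ _ _ _ hxl, List.length_set]
      exact h2 _
    · rw [cellSet, List.set_eq_of_length_le (by omega)]
      exact h2 _
  · rw [cellSet, getD_set_ne _ _ _ _ _ hk]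
    exact h2 _

-- the A/intermediate relational invariant
def InvTV (grid tmp : List (List Int)) (vis : PySem.Set (Int × Int)) (n : Int) : Prop :=
  GoodShape grid tmp ∧
  ∀ x y : Int, 0 ≤ x → x < n → 0 ≤ y → y < n →
    cellGet tmp x y = if (x, y) ∈ vis then 1 else cellGet grid x y

-- accumulator-shift lemmas for the A-side folds
theorem neighA_shift (n x y curD : Int) (k : Nat) (tmp : List (List Int))
    (q X : List (Int × Int × Int)) (c : Int) :
    neighA n x y curD (tmp, X ++ q, c) k =
      ((neighA n x y curD (tmp, q, c) k).1,
        X ++ (neighA n x y curD (tmp, q, c) k).2.1,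
        (neighA n x y curD (tmp, q, c) k).2.2) := by
  simp only [neighA]
  split_ifs <;> simp

theorem foldl_neighA_shift (n x y curD : Int) (ks : List Nat) :
    ∀ (tmp : List (List Int)) (q X : List (Int × Int × Int)) (c : Int),
    ks.foldl (neighA n x y curD) (tmp, X ++ q, c) =
      ((ks.foldl (neighA n x y curD) (tmp, q, c)).1,
        X ++ (ks.foldl (neighA n x y curD) (tmp, q, c)).2.1,
        (ks.foldl (neighA n x y curD) (tmp, q, c)).2.2) := by
  induction ks with
  | nil => intro tmp q X c; rfl
  | cons k ks ih =>
    intro tmp q X c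
    rcases hr : neighA n x y curD (tmp, q, c) k with ⟨t', q', c'⟩
    simp only [List.foldl_cons, neighA_shift, hr, ih]

def stepCellA (n curD : Int) (st : List (List Int) × List (Int × Int × Int) × Int)
    (p : Int × Int) : List (List Int) × List (Int × Int × Int) × Int :=
  (List.range 4).foldl (neighA n p.1 p.2 curD) st

theorem foldl_stepCellA_shift (n curD : Int) (F : List (Int × Int)) :
    ∀ (tmp : List (List Int)) (q X : List (Int × Int × Int)) (c : Int),
    F.foldl (stepCellA n curD) (tmp, X ++ q, c) =
      ((F.foldl (stepCellA n curD) (tmp, q, c)).1,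
        X ++ (F.foldl (stepCellA n curD) (tmp, q, c)).2.1,
        (F.foldl (stepCellA n curD) (tmp, q, c)).2.2) := by
  induction F with
  | nil => intro tmp q X c; rfl
  | cons p F ih =>
    intro tmp q X c
    rcases hr : stepCellA n curD (tmp, q, c) p with ⟨t', q', c'⟩
    have hs : stepCellA n curD (tmp, X ++ q, c) p = (t', X ++ q', c') := by
      rw [stepCellA, foldl_neighA_shift, ← stepCellA, hr]
    simp only [List.foldl_cons, hs, hr, ih]

-- L1: processing one whole level of the queue
theorem bfsLoopA_level (n d l : Int) (hd : l < d) (F : List (Int × Int)) :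
    ∀ (G : List (Int × Int × Int)) (tmp : List (List Int)) (count : Int) (fuel : Nat),
    bfsLoopA n d (fuel + F.length) ((F.map fun p => (p.1, p.2, l)) ++ G) tmp count =
      bfsLoopA n d fuel (G ++ (F.foldl (stepCellA n l) (tmp, [], count)).2.1)
        (F.foldl (stepCellA n l) (tmp, [], count)).1
        (F.foldl (stepCellA n l) (tmp, [], count)).2.2 := by
  induction F with
  | nil => intro G tmp count fuel; simp
  | cons p F ih =>
    intro G tmp count fuel
    rcases p with ⟨x, y⟩
    rcases hr : (List.range 4).foldl (neighA n x y l) (tmp, [], count) with ⟨t1, new1, c1⟩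
    have hstep : (List.range 4).foldl (neighA n x y l) (tmp, (F.map fun p => (p.1, p.2, l)) ++ G, count)
        = (t1, ((F.map fun p => (p.1, p.2, l)) ++ G) ++ new1, c1) := by
      have := foldl_neighA_shift n x y l (List.range 4) tmp []
        ((F.map fun p => (p.1, p.2, l)) ++ G) count
      simp only [List.append_nil] at this
      rw [this, hr]
    have hlen : fuel + (F.length + 1) = (fuel + F.length) + 1 := by omega
    simp only [List.map_cons, List.cons_append, List.length_cons, hlen, bfsLoopA,
      if_neg (by omega : ¬ d ≤ l), hstep]
    have h2 : ((F.map fun p => (p.1, p.2, l)) ++ G) ++ new1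
        = (F.map fun p => (p.1, p.2, l)) ++ (G ++ new1) := by simp
    rw [h2, ih (G ++ new1) t1 c1 fuel]
    rcases hs : F.foldl (stepCellA n l) (t1, [], c1) with ⟨T, N, C⟩
    have hfull : F.foldl (stepCellA n l) (stepCellA n l (tmp, [], count) (x, y)) = (T, new1 ++ N, C) := by
      have h0 : stepCellA n l (tmp, [], count) (x, y) = (t1, new1, c1) := by
        rw [stepCellA]; exact hr
      rw [h0]
      have := foldl_stepCellA_shift n l F t1 [] new1 c1
      simp only [List.append_nil] at this
      rw [this, hs]
    simp only [List.foldl_cons, hfull, List.append_assoc]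

-- skipping a whole level when l >= d
theorem bfsLoopA_skip (n d l : Int) (hd : d ≤ l) (F : List (Int × Int))
    (tmp : List (List Int)) (count : Int) :
    ∀ fuel : Nat, F.length ≤ fuel →
    bfsLoopA n d fuel (F.map fun p => (p.1, p.2, l)) tmp count = count := by
  induction F with
  | nil => intro fuel _; exact bfsLoopA_nil n d fuel tmp count
  | cons p F ih =>
    intro fuel hfuel
    cases fuel with
    | zero => simp at hfuel
    | succ f =>
      rcases p with ⟨x, y⟩
      simp only [List.map_cons, bfsLoopA, if_pos hd]
      exact ih f (by simpa using hfuel)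

-- relational state for one level expansion
def RelSt (grid : List (List Int)) (n l count0 : Int) (z0 : Nat)
    (sa : List (List Int) × List (Int × Int × Int) × Int)
    (sb : PySem.Set (Int × Int) × List (Int × Int)) : Prop :=
  InvTV grid sa.1 sb.1 n ∧
  sa.2.1 = sb.2.map (fun p => (p.1, p.2, l + 1)) ∧
  sa.2.2 = count0 + sb.2.length ∧
  zcount sa.1 + sb.2.length ≤ z0

-- A's per-candidate step (proof-side reshaping of the range-4 fold)
def candA (n l : Int) (st : List (List Int) × List (Int × Int × Int) × Int)
    (c : Int × Int) : List (List Int) × List (Int × Int × Int) × Int :=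
  if 0 ≤ c.1 ∧ c.1 < n ∧ 0 ≤ c.2 ∧ c.2 < n then
    if cellGet st.1 c.1 c.2 == 0 then
      (cellSet st.1 c.1 c.2, st.2.1 ++ [(c.1, c.2, l + 1)], st.2.2 + 1)
    else st
  else st

theorem stepCellA_eq_cands (n l : Int) (st : List (List Int) × List (Int × Int × Int) × Int)
    (p : Int × Int) :
    stepCellA n l st p = (candsB p.1 p.2).foldl (candA n l) st := by
  rcases p with ⟨x, y⟩
  show (List.range 4).foldl (neighA n x y l) st = _
  have h4 : List.range 4 = [0, 1, 2, 3] := by decide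
  rw [h4]
  simp [candsB, neighA, candA, dxA, dyA, sub_eq_add_neg]

theorem candA_candB_rel (grid : List (List Int)) (n l count0 : Int) (z0 : Nat)
    (hn : n = (grid.length : Int)) (hw : ∀ row ∈ grid, grid.length ≤ row.length)
    (sa : List (List Int) × List (Int × Int × Int) × Int)
    (sb : PySem.Set (Int × Int) × List (Int × Int))
    (h : RelSt grid n l count0 z0 sa sb) (c : Int × Int) :
    RelSt grid n l count0 z0 (candA n l sa c) (candStepB grid n sb c) := by
  rcases sa with ⟨tmp, q, cnt⟩
  rcases sb with ⟨vis, nxt⟩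
  rcases c with ⟨cx, cy⟩
  obtain ⟨⟨hshape, hpt⟩, hQ, hC, hz⟩ := h
  simp only at hQ hC hz
  by_cases hb : 0 ≤ cx ∧ cx < n ∧ 0 ≤ cy ∧ cy < n
  · obtain ⟨hcx0, hcxn, hcy0, hcyn⟩ := hb
    have hxlt : cx.toNat < tmp.length := by rw [hshape.1]; omega
    have hrowmem : grid.getD cx.toNat [] ∈ grid := by
      rw [List.getD_eq_getElem _ _ (by omega : cx.toNat < grid.length)]
      exact List.getElem_mem _
    have hrowlen : cy.toNat < (tmp.getD cx.toNat []).length := by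
      rw [hshape.2 cx.toNat]
      have := hw _ hrowmem
      omega
    have hv := hpt cx cy hcx0 hcxn hcy0 hcyn
    by_cases hm : (cx, cy) ∈ vis
    · -- already visited: both sides are no-ops
      have hA : (cellGet tmp cx cy == 0) = false := by
        rw [hm |> if_pos] at hv
        simp [hv]
      have hBc : PySem.Set.contains vis (cx, cy) = true := (PySem.Set.contains_iff _ _).mpr hm
      rw [candA, if_pos ⟨hcx0, hcxn, hcy0, hcyn⟩]
      simp only [hA, Bool.false_eq_true, if_false]
      rw [candStepB, if_neg (by simp only [not_and, Bool.not_eq_false]; exact fun _ _ => hBc)]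
      exact ⟨⟨hshape, hpt⟩, hQ, hC, hz⟩
    · rw [if_neg hm] at hv
      by_cases hg : cellGet grid cx cy = 0
      · -- new cell: both sides fire
        have hA : (cellGet tmp cx cy == 0) = true := by rw [hv]; simp [hg]
        have hBc : PySem.Set.contains vis (cx, cy) = false := by
          rw [← Bool.not_eq_true]
          simp [hm]
        rw [candA, if_pos ⟨hcx0, hcxn, hcy0, hcyn⟩]
        simp only [hA, if_true]
        rw [candStepB, if_pos ⟨⟨hcx0, hcxn, hcy0, hcyn⟩, by simpa [cellGetB_eq_cellGet] using hg, hBc⟩]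
        refine ⟨⟨goodShape_cellSet grid tmp cx cy hshape, ?_⟩, ?_, ?_, ?_⟩
        · intro a b ha0 han hb0 hbn
          by_cases hab : a = cx ∧ b = cy
          · obtain ⟨h1, h2⟩ := hab
            subst h1; subst h2
            rw [cellGet_cellSet_self tmp a b hxlt hrowlen,
              if_pos ((PySem.Set.mem_add _ _ _).mpr (Or.inr rfl))]
          · rw [cellGet_cellSet_ne tmp cx cy a b hcx0 hcy0 ha0 hb0 hab]
            have hmm : ((a, b) ∈ PySem.Set.add vis (cx, cy)) ↔ (a, b) ∈ vis := by
              rw [PySem.Set.mem_add]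
              constructor
              · rintro (h | h)
                · exact h
                · exact absurd (by simpa [Prod.ext_iff] using h) hab
              · exact Or.inl
            rw [hpt a b ha0 han hb0 hbn]
            by_cases hv2 : (a, b) ∈ vis
            · rw [if_pos hv2, if_pos (hmm.mpr hv2)]
            · rw [if_neg hv2, if_neg (fun hh => hv2 (hmm.mp hh))]
        · simp [hQ]
        · simp [hC]; omega
        · have := zcount_cellSet tmp cx cy hxlt hrowlen (by rw [hv]; exact hg)
          simp only [List.length_append, List.length_cons, List.length_nil]
          omega
      · -- blocked cell: both sides are no-ops
        have hA : (cellGet tmp cx cy == 0) = false := by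
          rw [hv]; simpa using hg
        rw [candA, if_pos ⟨hcx0, hcxn, hcy0, hcyn⟩]
        simp only [hA, Bool.false_eq_true, if_false]
        rw [candStepB, if_neg (by simp only [cellGetB_eq_cellGet, not_and, beq_iff_eq]; exact fun _ h => absurd h hg)]
        exact ⟨⟨hshape, hpt⟩, hQ, hC, hz⟩
  · rw [candA, if_neg hb, candStepB, if_neg (fun hh => hb hh.1)]
    exact ⟨⟨hshape, hpt⟩, hQ, hC, hz⟩

theorem foldl_cand_rel (grid : List (List Int)) (n l count0 : Int) (z0 : Nat)
    (hn : n = (grid.length : Int)) (hw : ∀ row ∈ grid, grid.length ≤ row.length)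
    (cs : List (Int × Int)) :
    ∀ sa sb, RelSt grid n l count0 z0 sa sb →
      RelSt grid n l count0 z0 (cs.foldl (candA n l) sa) (cs.foldl (candStepB grid n) sb) := by
  induction cs with
  | nil => intro sa sb h; exact h
  | cons c cs ih =>
    intro sa sb h
    exact ih _ _ (candA_candB_rel grid n l count0 z0 hn hw sa sb h c)

theorem level_rel (grid : List (List Int)) (n l count0 : Int) (z0 : Nat)
    (hn : n = (grid.length : Int)) (hw : ∀ row ∈ grid, grid.length ≤ row.length)
    (F : List (Int × Int)) :
    ∀ sa sb, RelSt grid n l count0 z0 sa sb →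
      RelSt grid n l count0 z0 (F.foldl (stepCellA n l) sa) (F.foldl (stepCellB grid n) sb) := by
  induction F with
  | nil => intro sa sb h; exact h
  | cons p F ih =>
    intro sa sb h
    have h1 : stepCellA n l sa p = (candsB p.1 p.2).foldl (candA n l) sa :=
      stepCellA_eq_cands n l sa p
    simp only [List.foldl_cons, h1]
    exact ih _ _ (foldl_cand_rel grid n l count0 z0 hn hw (candsB p.1 p.2) sa sb h)

-- L2: the whole multi-level loop
theorem main_levels (grid : List (List Int)) (n d : Int)
    (hn : n = (grid.length : Int)) (hw : ∀ row ∈ grid, grid.length ≤ row.length)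
    (s : Nat) :
    ∀ (l : Int), (d - l).toNat = s →
    ∀ (F : List (Int × Int)) (vis : PySem.Set (Int × Int)) (tmp : List (List Int))
      (count : Int) (fuel : Nat),
      InvTV grid tmp vis n →
      4 * zcount tmp + F.length ≤ fuel →
      bfsLoopA n d fuel (F.map fun p => (p.1, p.2, l)) tmp count =
        bLoopB grid n d s vis F count := by
  induction s with
  | zero =>
    intro l hs F vis tmp count fuel _ hfuel
    have hd : d ≤ l := by omega
    rw [bfsLoopA_skip n d l hd F tmp count fuel (by omega)]
    rfl
  | succ s ih =>
    intro l hs F vis tmp count fuel hInv hfuel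
    by_cases hF : F = []
    · subst hF
      rw [List.map_nil, bfsLoopA_nil]
      simp [bLoopB]
    · have hd : l < d := by omega
      have hfl : F.length ≤ fuel := by omega
      rcases hR : F.foldl (stepCellA n l) (tmp, [], count) with ⟨T, Q, C⟩
      rcases hS : F.foldl (stepCellB grid n) (vis, []) with ⟨vis', nxt⟩
      have hrel : RelSt grid n l count (zcount tmp) (T, Q, C) (vis', nxt) := by
        rw [← hR, ← hS]
        exact level_rel grid n l count (zcount tmp) hn hw F (tmp, [], count) (vis, [])
          ⟨hInv, by simp, by simp, by simp⟩
      obtain ⟨hInv', hQ, hC, hz⟩ := hrel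
      have h1 : fuel = (fuel - F.length) + F.length := by omega
      rw [h1, ← List.append_nil (F.map fun p => (p.1, p.2, l)),
        bfsLoopA_level n d l hd F [] tmp count (fuel - F.length), hR]
      simp only at hQ hC hz hInv'
      rw [hQ, List.nil_append, hC]
      rw [ih (l + 1) (by omega) nxt vis' T (count + nxt.length) (fuel - F.length) hInv'
        (by omega)]
      simp only [bLoopB, if_neg hF, hS]

-- generic fst-projection fold congruence for the outer loops
theorem foldl_fst_rel {α : Type} (l : List α) (fA : (Int × Int × Int) → α → (Int × Int × Int))
    (fB : Int → α → Int)
    (h : ∀ s t x, x ∈ l → s.1 = t → (fA s x).1 = fB t x) :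
    ∀ (s : Int × Int × Int) (t : Int), s.1 = t → (l.foldl fA s).1 = l.foldl fB t := by
  induction l with
  | nil => intro s t hst; exact hst
  | cons x l ih =>
    intro s t hst
    exact ih (fun s t y hy => h s t y (List.mem_cons_of_mem _ hy))
      (fA s x) (fB t x) (h s t x (List.mem_cons_self) hst)

-- ===================================================================
-- Step 2: frontier machine = matrix relaxation machine
-- ===================================================================

def Inb (n : Int) (c : Int × Int) : Prop := 0 ≤ c.1 ∧ c.1 < n ∧ 0 ≤ c.2 ∧ c.2 < n

def NewCell (grid : List (List Int)) (n : Int) (vis0 : PySem.Set (Int × Int)) (c : Int × Int) : Prop :=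
  Inb n c ∧ cellGetB grid c.1 c.2 = 0 ∧ c ∉ vis0

-- one fold over a flat candidate list, characterised
theorem fold_cand_char (grid : List (List Int)) (n : Int) (vis0 : PySem.Set (Int × Int))
    (cs : List (Int × Int)) :
    ∀ (vis : PySem.Set (Int × Int)) (acc : List (Int × Int)),
    (∀ c, c ∈ vis ↔ c ∈ vis0 ∨ c ∈ acc) → acc.Nodup →
    (∀ c ∈ acc, NewCell grid n vis0 c) →
    (∀ c, c ∈ (cs.foldl (candStepB grid n) (vis, acc)).1 ↔
        c ∈ vis0 ∨ c ∈ (cs.foldl (candStepB grid n) (vis, acc)).2) ∧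
    (cs.foldl (candStepB grid n) (vis, acc)).2.Nodup ∧
    (∀ c ∈ (cs.foldl (candStepB grid n) (vis, acc)).2,
        NewCell grid n vis0 c ∧ (c ∈ acc ∨ c ∈ cs)) ∧
    (∀ c ∈ acc, c ∈ (cs.foldl (candStepB grid n) (vis, acc)).2) ∧
    (∀ c ∈ cs, NewCell grid n vis0 c → c ∈ (cs.foldl (candStepB grid n) (vis, acc)).2) := by
  induction cs with
  | nil =>
    intro vis acc H1 H2 H3
    exact ⟨H1, H2, fun c hc => ⟨H3 c hc, Or.inl hc⟩, fun c hc => hc, by simp⟩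
  | cons c0 cs ih =>
    intro vis acc H1 H2 H3
    simp only [List.foldl_cons]
    by_cases hfire : (0 ≤ c0.1 ∧ c0.1 < n ∧ 0 ≤ c0.2 ∧ c0.2 < n) ∧
        cellGetB grid c0.1 c0.2 == 0 ∧ PySem.Set.contains vis c0 = false
    · have hstep : candStepB grid n (vis, acc) c0 = (PySem.Set.add vis c0, acc ++ [c0]) := by
        rw [candStepB, if_pos hfire]
      obtain ⟨hinb, hbeq, hcont⟩ := hfire
      have hc0vis : c0 ∉ vis := by
        intro h
        rw [(PySem.Set.contains_iff _ _).mpr h] at hcont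
        cases hcont
      have hc0vis0 : c0 ∉ vis0 := fun h => hc0vis ((H1 c0).mpr (Or.inl h))
      have hc0acc : c0 ∉ acc := fun h => hc0vis ((H1 c0).mpr (Or.inr h))
      have hnew : NewCell grid n vis0 c0 := ⟨hinb, by simpa using hbeq, hc0vis0⟩
      have H1' : ∀ c, c ∈ PySem.Set.add vis c0 ↔ c ∈ vis0 ∨ c ∈ acc ++ [c0] := by
        intro c
        rw [PySem.Set.mem_add, H1 c, List.mem_append]
        simp only [List.mem_singleton]
        tauto
      have H2' : (acc ++ [c0]).Nodup := by
        rw [List.nodup_append]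
        refine ⟨H2, List.nodup_singleton _, ?_⟩
        intro a ha b hb
        simp only [List.mem_singleton] at hb
        subst hb
        exact fun h => hc0acc (h ▸ ha)
      have H3' : ∀ c ∈ acc ++ [c0], NewCell grid n vis0 c := by
        intro c hc
        rcases List.mem_append.mp hc with h | h
        · exact H3 c h
        · simp only [List.mem_singleton] at h
          subst h
          exact hnew
      obtain ⟨I1, I2, I3, I4, I5⟩ := ih (PySem.Set.add vis c0) (acc ++ [c0]) H1' H2' H3'
      rw [hstep]
      refine ⟨I1, I2, ?_, ?_, ?_⟩
      · intro c hc
        obtain ⟨hn1, ho⟩ := I3 c hc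
        refine ⟨hn1, ?_⟩
        rcases ho with h | h
        · rcases List.mem_append.mp h with h' | h'
          · exact Or.inl h'
          · simp only [List.mem_singleton] at h'
            exact Or.inr (by simp [h'])
        · exact Or.inr (List.mem_cons_of_mem _ h)
      · intro c hc
        exact I4 c (List.mem_append.mpr (Or.inl hc))
      · intro c hc hcn
        rcases List.mem_cons.mp hc with rfl | h
        · exact I4 c (List.mem_append.mpr (Or.inr (by simp)))
        · exact I5 c h hcn
    · have hstep : candStepB grid n (vis, acc) c0 = (vis, acc) := by
        rw [candStepB, if_neg hfire]
      rw [hstep]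
      obtain ⟨I1, I2, I3, I4, I5⟩ := ih vis acc H1 H2 H3
      refine ⟨I1, I2, ?_, I4, ?_⟩
      · intro c hc
        obtain ⟨hn1, ho⟩ := I3 c hc
        exact ⟨hn1, ho.imp id (List.mem_cons_of_mem _)⟩
      · intro c hc hcn
        rcases List.mem_cons.mp hc with rfl | h
        · -- the step did not fire on c, yet c is a NewCell: so c was already in acc
          obtain ⟨hni, hne, hnv⟩ := hcn
          have hca : c ∈ acc := by
            by_contra hca
            have hcv : c ∉ vis := fun h => by
              rcases (H1 c).mp h with h' | h'
              · exact hnv h'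
              · exact hca h'
            exact hfire ⟨hni, by simpa using hne,
              by rw [← Bool.not_eq_true]; simpa using fun h => hcv ((PySem.Set.contains_iff _ _).mp h)⟩
          exact I4 c hca
        · exact I5 c h hcn

-- one frontier round, characterised
theorem round_char (grid : List (List Int)) (n : Int) (vis0 : PySem.Set (Int × Int))
    (F : List (Int × Int))
    (vis : PySem.Set (Int × Int))
    (H1 : ∀ c, c ∈ vis ↔ c ∈ vis0) :
    (∀ c, c ∈ (F.foldl (stepCellB grid n) (vis, [])).1 ↔
        c ∈ vis0 ∨ c ∈ (F.foldl (stepCellB grid n) (vis, [])).2) ∧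
    (F.foldl (stepCellB grid n) (vis, [])).2.Nodup ∧
    (∀ c ∈ (F.foldl (stepCellB grid n) (vis, [])).2,
        NewCell grid n vis0 c ∧ ∃ p ∈ F, c ∈ candsB p.1 p.2) ∧
    (∀ c p, p ∈ F → c ∈ candsB p.1 p.2 → NewCell grid n vis0 c →
        c ∈ (F.foldl (stepCellB grid n) (vis, [])).2) := by
  have hflat : F.foldl (stepCellB grid n) (vis, []) =
      (F.flatMap (fun p => candsB p.1 p.2)).foldl (candStepB grid n) (vis, []) := by
    rw [List.foldl_flatMap]
    rfl
  obtain ⟨I1, I2, I3, I4, I5⟩ := fold_cand_char grid n vis0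
    (F.flatMap (fun p => candsB p.1 p.2)) vis []
    (by intro c; rw [H1 c]; simp) List.nodup_nil (by simp)
  rw [hflat]
  refine ⟨I1, I2, ?_, ?_⟩
  · intro c hc
    obtain ⟨hn1, ho⟩ := I3 c hc
    refine ⟨hn1, ?_⟩
    rcases ho with h | h
    · cases h
    · exact List.mem_flatMap.mp h
  · intro c p hp hcp hcn
    exact I5 c (List.mem_flatMap.mpr ⟨p, hp, hcp⟩) hcn

def MatRep (n : Int) (vis : PySem.Set (Int × Int)) (m : List (List Bool)) : Prop :=
  ∀ x y : Int, 0 ≤ x → x < n → 0 ≤ y → y < n → rget m x y = decide ((x, y) ∈ vis)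

def Closed (grid : List (List Int)) (n : Int) (vis : PySem.Set (Int × Int))
    (F : List (Int × Int)) : Prop :=
  ∀ v c, v ∈ vis → v ∉ F → c ∈ candsB v.1 v.2 → Inb n c →
    cellGetB grid c.1 c.2 = 0 → c ∈ vis

theorem adj_symm (a b x y : Int) : (a, b) ∈ candsB x y ↔ (x, y) ∈ candsB a b := by
  simp only [candsB, List.mem_cons, List.not_mem_nil, or_false, Prod.mk.injEq]
  constructor <;> (intro h; omega)

theorem bLoopB_nil (grid : List (List Int)) (n d : Int) (s : Nat)
    (vis : PySem.Set (Int × Int)) (count : Int) :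
    bLoopB grid n d s vis [] count = count := by
  cases s <;> rfl

theorem rget_map (g : Int → Int → Bool) (n x y : Int)
    (h0 : 0 ≤ x) (h1 : x < n) (h2 : 0 ≤ y) (h3 : y < n) :
    rget ((PySem.List.pyRange 0 n 1).map (fun a => (PySem.List.pyRange 0 n 1).map (fun b => g a b)))
      x y = g x y := by
  unfold rget
  rw [← PySem.List.pyGetD_of_nonneg _ _ h2, ← PySem.List.pyGetD_of_nonneg _ _ h0,
    PySem.List.pyGetD_map_pyRange_of_nonneg _ n x _ h0 h1,
    PySem.List.pyGetD_map_pyRange_of_nonneg _ n y _ h2 h3]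

-- one matrix relaxation round computes the frontier round's new visited set
theorem relax_round (grid : List (List Int)) (n : Int)
    (vis : PySem.Set (Int × Int)) (F : List (Int × Int)) (reach : List (List Bool))
    (hrep : MatRep n vis reach) (hcl : Closed grid n vis F) (hF : ∀ c ∈ F, c ∈ vis)
    (hvinb : ∀ c ∈ vis, Inb n c) :
    MatRep n (F.foldl (stepCellB grid n) (vis, [])).1 (relaxMat grid n reach) := by
  obtain ⟨I1, I2, I3, I4⟩ := round_char grid n vis F vis (fun c => Iff.rfl)
  intro x y hx0 hxn hy0 hyn
  have hr : ∀ a b : Int, 0 ≤ a → a < n → 0 ≤ b → b < n →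
      (rget reach a b = true ↔ (a, b) ∈ vis) := by
    intro a b ha0 han hb0 hbn
    rw [hrep a b ha0 han hb0 hbn]
    simp
  rw [relaxMat, rget_map _ n x y hx0 hxn hy0 hyn, Bool.eq_iff_iff]
  simp only [Bool.or_eq_true, Bool.and_eq_true, decide_eq_true_iff, beq_iff_eq]
  rw [I1 (x, y), hr x y hx0 hxn hy0 hyn]
  constructor
  · rintro (hv | ⟨hg, hnb⟩)
    · exact Or.inl hv
    · by_cases hv : (x, y) ∈ vis
      · exact Or.inl hv
      · refine Or.inr ?_
        have hnew : NewCell grid n vis (x, y) := ⟨⟨hx0, hxn, hy0, hyn⟩, hg, hv⟩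
        have key : ∀ p : Int × Int, Inb n p → p ∈ vis → p ∈ candsB x y →
            (x, y) ∈ (F.foldl (stepCellB grid n) (vis, [])).2 := by
          intro p hpin hpv hpc
          have hadj : (x, y) ∈ candsB p.1 p.2 := (adj_symm p.1 p.2 x y).mp (by simpa using hpc)
          by_cases hpF : p ∈ F
          · exact I4 (x, y) p hpF hadj hnew
          · exact absurd (hcl p (x, y) hpv hpF hadj ⟨hx0, hxn, hy0, hyn⟩ hg) hv
        rcases hnb with ((⟨hx, hb⟩ | ⟨hx, hb⟩) | ⟨hy', hb⟩) | ⟨hy', hb⟩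
        · exact key (x - 1, y) ⟨by omega, by omega, hy0, hyn⟩
            ((hr (x - 1) y (by omega) (by omega) hy0 hyn).mp hb) (by simp [candsB])
        · exact key (x + 1, y) ⟨by omega, hx, hy0, hyn⟩
            ((hr (x + 1) y (by omega) hx hy0 hyn).mp hb) (by simp [candsB])
        · exact key (x, y - 1) ⟨hx0, hxn, by omega, by omega⟩
            ((hr x (y - 1) hx0 hxn (by omega) (by omega)).mp hb) (by simp [candsB])
        · exact key (x, y + 1) ⟨hx0, hxn, by omega, hy'⟩
            ((hr x (y + 1) hx0 hxn (by omega) hy').mp hb) (by simp [candsB])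
  · rintro (hv | hnxt)
    · exact Or.inl hv
    · obtain ⟨⟨hinb, hg, _⟩, p, hpF, hpc⟩ := I3 (x, y) hnxt
      have hpv : p ∈ vis := hF p hpF
      have hpin : Inb n p := hvinb p hpv
      have hpcand : (p.1, p.2) ∈ candsB x y := (adj_symm x y p.1 p.2).mp hpc
      refine Or.inr ⟨hg, ?_⟩
      obtain ⟨p1, p2⟩ := p
      obtain ⟨hp1, hp2, hp3, hp4⟩ := hpin
      simp only [candsB, List.mem_cons, List.not_mem_nil, or_false, Prod.mk.injEq] at hpcand
      have hrp : rget reach p1 p2 = true := (hr p1 p2 hp1 hp2 hp3 hp4).mpr hpv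
      rcases hpcand with ⟨he1, he2⟩ | ⟨he1, he2⟩ | ⟨he1, he2⟩ | ⟨he1, he2⟩
      · exact Or.inr ⟨by omega, by rw [show y + 1 = p2 from he2.symm, show x = p1 from he1.symm]; exact hrp⟩
      · exact Or.inl (Or.inr ⟨by omega, by rw [show y - 1 = p2 from he2.symm, show x = p1 from he1.symm]; exact hrp⟩)
      · exact Or.inl (Or.inl (Or.inr ⟨by omega, by rw [show x + 1 = p1 from he1.symm, show y = p2 from he2.symm]; exact hrp⟩))
      · exact Or.inl (Or.inl (Or.inl ⟨by omega, by rw [show x - 1 = p1 from he1.symm, show y = p2 from he2.symm]; exact hrp⟩))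

-- a double 0/1 sum over the grid counts a nodup in-bounds list of cells
theorem sum_point (n : Int) (c : Int × Int) (h : Inb n c) :
    ((PySem.List.pyRange 0 n 1).map (fun x =>
      ((PySem.List.pyRange 0 n 1).map (fun y => if (x, y) = c then (1 : Int) else 0)).sum)).sum
      = 1 := by
  obtain ⟨c1, c2⟩ := c
  obtain ⟨h1, h2, h3, h4⟩ := h
  have hin : ∀ x ∈ PySem.List.pyRange 0 n 1,
      ((PySem.List.pyRange 0 n 1).map (fun y => if (x, y) = (c1, c2) then (1 : Int) else 0)).sum
        = if x = c1 then 1 else 0 := by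
    intro x _
    by_cases hxc : x = c1
    · subst hxc
      rw [if_pos rfl]
      have he : (fun y => if (x, y) = (x, c2) then (1 : Int) else 0)
          = fun y => if (y == c2) = true then (1 : Int) else 0 := by
        funext y
        simp [Prod.ext_iff]
      rw [he, PySem.List.sum_map_ite_one_zero]
      have : List.countP (fun y => y == c2) (PySem.List.pyRange 0 n 1)
          = List.count c2 (PySem.List.pyRange 0 n 1) := by
        simp [List.count_eq_countP]
      rw [this, List.count_eq_one_of_mem (PySem.List.nodup_pyRange_one 0 n)
        (PySem.List.mem_pyRange_one.mpr ⟨h3, h4⟩)]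
      rfl
    · rw [if_neg hxc]
      apply List.sum_eq_zero
      intro z hz
      obtain ⟨y, _, hy⟩ := List.mem_map.mp hz
      rw [← hy, if_neg (by simp [Prod.ext_iff]; intro h; exact absurd h hxc)]
  rw [List.map_congr_left hin]
  have he : (fun x => if x = c1 then (1 : Int) else 0)
      = fun x => if (x == c1) = true then (1 : Int) else 0 := by
    funext x; simp
  rw [he, PySem.List.sum_map_ite_one_zero]
  have : List.countP (fun x => x == c1) (PySem.List.pyRange 0 n 1)
      = List.count c1 (PySem.List.pyRange 0 n 1) := by
    simp [List.count_eq_countP]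
  rw [this, List.count_eq_one_of_mem (PySem.List.nodup_pyRange_one 0 n)
    (PySem.List.mem_pyRange_one.mpr ⟨h1, h2⟩)]
  rfl

theorem sum_ind (n : Int) (S : List (Int × Int)) (hS : S.Nodup) (hin : ∀ c ∈ S, Inb n c) :
    ((PySem.List.pyRange 0 n 1).map (fun x =>
      ((PySem.List.pyRange 0 n 1).map (fun y => if (x, y) ∈ S then (1 : Int) else 0)).sum)).sum
      = S.length := by
  induction S with
  | nil =>
    simp
  | cons c S ih =>
    have hcS : c ∉ S := (List.nodup_cons.mp hS).1
    have hsplit : ∀ x ∈ PySem.List.pyRange 0 n 1,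
        ((PySem.List.pyRange 0 n 1).map (fun y => if (x, y) ∈ c :: S then (1 : Int) else 0)).sum
          = ((PySem.List.pyRange 0 n 1).map (fun y =>
              (if (x, y) = c then (1 : Int) else 0) + (if (x, y) ∈ S then (1 : Int) else 0))).sum := by
      intro x _
      congr 1
      apply List.map_congr_left
      intro y _
      by_cases hc1 : (x, y) = c
      · subst hc1
        rw [if_pos (List.mem_cons_self), if_pos rfl, if_neg hcS]
        omega
      · by_cases hc2 : (x, y) ∈ S
        · rw [if_pos (List.mem_cons_of_mem _ hc2), if_neg hc1, if_pos hc2]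
          omega
        · rw [if_neg (by simp [hc1, hc2]), if_neg hc1, if_neg hc2]
          omega
    rw [List.map_congr_left hsplit]
    have hsum : ∀ x ∈ PySem.List.pyRange 0 n 1,
        ((PySem.List.pyRange 0 n 1).map (fun y =>
            (if (x, y) = c then (1 : Int) else 0) + (if (x, y) ∈ S then (1 : Int) else 0))).sum
          = ((PySem.List.pyRange 0 n 1).map (fun y => if (x, y) = c then (1 : Int) else 0)).sum
            + ((PySem.List.pyRange 0 n 1).map (fun y => if (x, y) ∈ S then (1 : Int) else 0)).sum := by
      intro x _
      exact PySem.List.sum_map_add_int _ _ _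
    rw [List.map_congr_left hsum]
    rw [show (fun x => ((PySem.List.pyRange 0 n 1).map (fun y => if (x, y) = c then (1 : Int) else 0)).sum
            + ((PySem.List.pyRange 0 n 1).map (fun y => if (x, y) ∈ S then (1 : Int) else 0)).sum)
        = fun x => ((fun x => ((PySem.List.pyRange 0 n 1).map (fun y => if (x, y) = c then (1 : Int) else 0)).sum) x)
            + ((fun x => ((PySem.List.pyRange 0 n 1).map (fun y => if (x, y) ∈ S then (1 : Int) else 0)).sum) x)
        from rfl,
      PySem.List.sum_map_add_int]
    rw [sum_point n c (hin c List.mem_cons_self),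
      ih (List.nodup_cons.mp hS).2 (fun c' hc' => hin c' (List.mem_cons_of_mem _ hc'))]
    simp
    omega

theorem addedCnt_spec (n : Int) (nw reach : List (List Bool)) (S : List (Int × Int))
    (hS : S.Nodup) (hSin : ∀ c ∈ S, Inb n c)
    (hpt : ∀ x y : Int, 0 ≤ x → x < n → 0 ≤ y → y < n →
        ((rget nw x y && !rget reach x y) = true ↔ (x, y) ∈ S)) :
    addedCnt n nw reach = S.length := by
  unfold addedCnt
  rw [PySem.List.foldl_congr_mem _ _
    (fun acc x => acc + ((PySem.List.pyRange 0 n 1).map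
      (fun y => if rget nw x y && !rget reach x y then (1 : Int) else 0)).sum) 0
    (fun acc x _ => PySem.List.foldl_add _ _ acc),
    PySem.List.foldl_add]
  have hcongr : ∀ x ∈ PySem.List.pyRange 0 n 1,
      ((PySem.List.pyRange 0 n 1).map
        (fun y => if rget nw x y && !rget reach x y then (1 : Int) else 0)).sum
      = ((PySem.List.pyRange 0 n 1).map (fun y => if (x, y) ∈ S then (1 : Int) else 0)).sum := by
    intro x hx
    obtain ⟨hx0, hxn⟩ := PySem.List.mem_pyRange_one.mp hx
    congr 1
    apply List.map_congr_left
    intro y hy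
    obtain ⟨hy0, hyn⟩ := PySem.List.mem_pyRange_one.mp hy
    by_cases hb : (rget nw x y && !rget reach x y) = true
    · rw [if_pos hb, if_pos ((hpt x y hx0 hxn hy0 hyn).mp hb)]
    · rw [if_neg hb, if_neg (fun h => hb ((hpt x y hx0 hxn hy0 hyn).mpr h))]
  rw [List.map_congr_left hcongr, sum_ind n S hS hSin]
  simp

theorem bridge (grid : List (List Int)) (n d : Int) (s : Nat) :
    ∀ (vis : PySem.Set (Int × Int)) (F : List (Int × Int)) (reach : List (List Bool)) (count : Int),
      MatRep n vis reach → Closed grid n vis F → (∀ c ∈ F, c ∈ vis) →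
      (∀ c ∈ vis, Inb n c) →
      bLoopB grid n d s vis F count = relaxLoop grid n s reach count := by
  induction s with
  | zero => intro vis F reach count _ _ _ _; rfl
  | succ s ih =>
    intro vis F reach count hrep hcl hF hvinb
    obtain ⟨I1, I2, I3, I4⟩ := round_char grid n vis F vis (fun c => Iff.rfl)
    rcases hr : F.foldl (stepCellB grid n) (vis, []) with ⟨vis', nxt⟩
    rw [hr] at I1 I2 I3 I4
    simp only at I1 I2 I3 I4
    have hrep' : MatRep n vis' (relaxMat grid n reach) := by
      have := relax_round grid n vis F reach hrep hcl hF hvinb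
      rw [hr] at this
      exact this
    have hadded : addedCnt n (relaxMat grid n reach) reach = nxt.length := by
      refine addedCnt_spec n _ reach nxt I2 (fun c hc => (I3 c hc).1.1) ?_
      intro x y hx0 hxn hy0 hyn
      rw [Bool.and_eq_true, Bool.not_eq_eq_eq_not, Bool.not_true,
        hrep' x y hx0 hxn hy0 hyn, hrep x y hx0 hxn hy0 hyn]
      simp only [decide_eq_true_iff, decide_eq_false_iff_not]
      constructor
      · rintro ⟨hv', hv⟩
        rcases (I1 (x, y)).mp hv' with h | h
        · exact absurd h hv
        · exact h
      · intro hn'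
        exact ⟨(I1 (x, y)).mpr (Or.inr hn'), (I3 (x, y) hn').1.2.2⟩
    by_cases hFnil : F = []
    · subst hFnil
      have hnil : nxt = [] := by
        simp only [List.foldl_nil] at hr
        exact (Prod.mk.injEq .. ▸ hr).2.symm ▸ rfl
      rw [bLoopB_nil]
      simp only [relaxLoop, hadded, hnil, List.length_nil]
      rfl
    · have hb1 : bLoopB grid n d (s + 1) vis F count = bLoopB grid n d s vis' nxt (count + nxt.length) := by
        simp only [bLoopB, if_neg hFnil, hr]
      rw [hb1]
      by_cases hnxt : nxt = []
      · subst hnxt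
        rw [bLoopB_nil]
        simp only [relaxLoop, hadded, List.length_nil]
        norm_num
      · have hpos : (nxt.length : Int) ≠ 0 := by
          simp [List.length_eq_zero_iff, hnxt]
        have hcl' : Closed grid n vis' nxt := by
          intro v c hv hvF hcadj hinb hempty
          have hvv : v ∈ vis := by
            rcases (I1 v).mp hv with h | h
            · exact h
            · exact absurd h hvF
          by_cases hc : c ∈ vis
          · exact (I1 c).mpr (Or.inl hc)
          · have hnew : NewCell grid n vis c := ⟨hinb, hempty, hc⟩
            by_cases hvf : v ∈ F
            · exact (I1 c).mpr (Or.inr (I4 c v hvf hcadj hnew))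
            · exact absurd (hcl v c hvv hvf hcadj hinb hempty) hc
        have hF' : ∀ c ∈ nxt, c ∈ vis' := fun c hc => (I1 c).mpr (Or.inr hc)
        have hvinb' : ∀ c ∈ vis', Inb n c := by
          intro c hc
          rcases (I1 c).mp hc with h | h
          · exact hvinb c h
          · exact (I3 c h).1.1
        rw [ih vis' nxt (relaxMat grid n reach) (count + nxt.length) hrep' hcl' hF' hvinb']
        simp only [relaxLoop, hadded, if_neg hpos]

-- Step 1 conclusion: one source cell, A's BFS equals the frontier machine
theorem bfs_source (grid : List (List Int)) (d n i j : Int)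
    (hn : n = (grid.length : Int)) (hw : ∀ row ∈ grid, grid.length ≤ row.length)
    (hi : 0 ≤ i) (hi' : i < n) (hj : 0 ≤ j) (hj' : j < n) :
    bfsA n d grid i j = bLoopB grid n d d.toNat (PySem.Set.ofList [(i, j)]) [(i, j)] 1 := by
  have hxlt : i.toNat < grid.length := by omega
  have hrowmem : grid.getD i.toNat [] ∈ grid := by
    rw [List.getD_eq_getElem _ _ (by omega : i.toNat < grid.length)]
    exact List.getElem_mem _
  have hrowlen : j.toNat < (grid.getD i.toNat []).length := by
    have := hw _ hrowmem
    omega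
  have hInv : InvTV grid (cellSet grid i j) (PySem.Set.ofList [(i, j)]) n := by
    refine ⟨goodShape_cellSet grid grid i j (goodShape_refl grid), ?_⟩
    intro a b ha0 han hb0 hbn
    have hmem : ((a, b) ∈ PySem.Set.ofList [(i, j)]) ↔ a = i ∧ b = j := by
      rw [PySem.Set.mem_ofList]
      simp [Prod.ext_iff]
    by_cases hab : a = i ∧ b = j
    · obtain ⟨h1, h2⟩ := hab
      subst h1; subst h2
      rw [cellGet_cellSet_self grid a b hxlt hrowlen, if_pos (hmem.mpr ⟨rfl, rfl⟩)]
    · rw [cellGet_cellSet_ne grid i j a b hi hj ha0 hb0 hab,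
        if_neg (fun hh => hab (hmem.mp hh))]
  have hfuel : 4 * zcount (cellSet grid i j) + ([(i, j)] : List (Int × Int)).length
      ≤ 4 * (grid.map List.length).sum + 1 := by
    have h1 := zcount_cellSet_le grid i j
    have h2 := zcount_le_sumlen grid
    simp only [List.length_cons, List.length_nil]
    omega
  have := main_levels grid n d hn hw d.toNat 0 (by simp) [(i, j)]
    (PySem.Set.ofList [(i, j)]) (cellSet grid i j) 1
    (4 * (grid.map List.length).sum + 1) hInv hfuel
  simpa [bfsA] using this

theorem source_eq (grid : List (List Int)) (d n i j : Int)
    (hn : n = (grid.length : Int)) (hw : ∀ row ∈ grid, grid.length ≤ row.length)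
    (hi : 0 ≤ i) (hi' : i < n) (hj : 0 ≤ j) (hj' : j < n) :
    bfsA n d grid i j = relaxLoop grid n d.toNat (initMat n i j) 1 := by
  rw [bfs_source grid d n i j hn hw hi hi' hj hj']
  refine bridge grid n d d.toNat (PySem.Set.ofList [(i, j)]) [(i, j)] (initMat n i j) 1 ?_ ?_ ?_ ?_
  · intro x y hx0 hxn hy0 hyn
    rw [initMat, rget_map _ n x y hx0 hxn hy0 hyn, Bool.eq_iff_iff]
    rw [Bool.and_eq_true, beq_iff_eq, beq_iff_eq, decide_eq_true_iff, PySem.Set.mem_ofList]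
    simp [Prod.ext_iff]
  · intro v c hv hvF _ _ _
    rw [PySem.Set.mem_ofList] at hv
    simp only [List.mem_singleton] at hv
    exact absurd (by simp [hv]) hvF
  · intro c hc
    rw [PySem.Set.mem_ofList]
    exact hc
  · intro c hc
    rw [PySem.Set.mem_ofList] at hc
    simp only [List.mem_singleton] at hc
    subst hc
    exact ⟨hi, hi', hj, hj'⟩

-- ===== VERDICT (by name: the statement is the Claim_ definition above) =====
theorem solution_spec : Claim_equal_solution := by
  intro grid d _ hpre
  unfold Spec_solution solution solution_alt
  refine foldl_fst_rel _ _ _ ?_ _ _ rfl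
  intro s t i hi hst
  refine foldl_fst_rel _ _ _ ?_ _ _ hst
  intro s' t' j hj hst'
  have hi' := PySem.List.mem_pyRange_one.mp hi
  have hj' := PySem.List.mem_pyRange_one.mp hj
  simp only [cellGetB_eq_cellGet]
  by_cases hc : (cellGet grid i j == 0) = true
  · simp only [hc, if_true]
    rw [source_eq grid d _ i j rfl hpre hi'.1 hi'.2 hj'.1 hj'.2, ← hst']
    split_ifs <;> rfl
  · simp only [hc, Bool.false_eq_true, if_false]
    exact hst'
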